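-- pv_equiv track=rewrite | github.com/acapbumble/Data-Structure-Algorithm-2 | measure_performance.py | distribute_power_plant_load
-- ===== SOURCE A (Python) =====
-- def distribute_power_plant_load(power_plants, loads):
--     n = len(power_plants)
--     m = len(loads)
--     dp = [[0 for j in range(m + 1)] for i in range(n + 1)]
--
--     for i in range(1, n + 1):
--         for j in range(1, m + 1):
--             if loads[j - 1] <= power_plants[i - 1]:
--                 dp[i][j] = max(dp[i][j - 1], dp[i - 1][j - 1] + loads[j - 1])
--             else:
--                 dp[i][j] = dp[i][j - 1]
--
--     return dp[n][m]
-- ===== SOURCE B (Python) =====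
-- def distribute_power_plant_load(power_plants, loads):
--     # Top-down memoized recursion: solve(i, j) = best sum using the first i
--     # plants and first j loads; only demanded cells are computed.
--     memo = {}
--
--     def solve(i, j):
--         if i == 0 or j == 0:
--             return 0
--         if (i, j) not in memo:
--             r = solve(i, j - 1)
--             if loads[j - 1] <= power_plants[i - 1]:
--                 r = max(r, solve(i - 1, j - 1) + loads[j - 1])
--             memo[(i, j)] = r
--         return memo[(i, j)]
--
--     return solve(len(power_plants), len(loads))
-- ===== Notes on version B (the rewrite author's own statement) =====
-- stated objective: alternative
-- what changed: Replaces the bottom-up (n+1)x(m+1) table fill with a top-down memoized recursion solve(i, j) on prefix lengths that computes only the cells the final answer demands.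
import Mathlib
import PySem

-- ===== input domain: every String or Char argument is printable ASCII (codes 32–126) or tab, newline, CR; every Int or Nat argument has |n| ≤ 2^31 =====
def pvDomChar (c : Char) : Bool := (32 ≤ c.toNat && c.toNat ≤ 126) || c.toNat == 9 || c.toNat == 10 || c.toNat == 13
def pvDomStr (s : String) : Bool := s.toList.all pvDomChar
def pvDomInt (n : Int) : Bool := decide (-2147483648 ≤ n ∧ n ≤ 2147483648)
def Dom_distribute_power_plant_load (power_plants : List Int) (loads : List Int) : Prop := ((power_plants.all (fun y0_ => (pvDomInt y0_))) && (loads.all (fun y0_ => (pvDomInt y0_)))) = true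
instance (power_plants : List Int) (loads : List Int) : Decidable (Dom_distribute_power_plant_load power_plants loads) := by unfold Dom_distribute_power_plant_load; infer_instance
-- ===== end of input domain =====

-- B replaces A's bottom-up table fill by a top-down memoized recursion on prefix lengths (same values, stated as an exact-equivalence claim).

-- ===== PORT A =====
-- All dp/loads/power_plants indices in A are nonnegative and in range, so the
-- total forms pyGetD/pySetD are exact here (Python never raises in this code).
def distribute_power_plant_load (power_plants : List Int) (loads : List Int) : Int :=
  let n : Int := power_plants.length
  let m : Int := loads.length
  let dp : List (List Int) :=
    (PySem.List.pyRange 0 (n + 1) 1).map (fun _ =>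
      (PySem.List.pyRange 0 (m + 1) 1).map (fun _ => (0 : Int)))
  let dp := (PySem.List.pyRange 1 (n + 1) 1).foldl (fun dp i =>
    (PySem.List.pyRange 1 (m + 1) 1).foldl (fun dp j =>
      let v : Int :=
        if PySem.List.pyGetD loads (j - 1) 0 ≤ PySem.List.pyGetD power_plants (i - 1) 0 then
          max (PySem.List.pyGetD (PySem.List.pyGetD dp i []) (j - 1) 0)
              (PySem.List.pyGetD (PySem.List.pyGetD dp (i - 1) []) (j - 1) 0
                + PySem.List.pyGetD loads (j - 1) 0)
        else
          PySem.List.pyGetD (PySem.List.pyGetD dp i []) (j - 1) 0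
      PySem.List.pySetD dp i (PySem.List.pySetD (PySem.List.pyGetD dp i []) j v)) dp) dp
  PySem.List.pyGetD (PySem.List.pyGetD dp n []) m 0

-- ===== PORT B =====
-- Source B's solve(i, j): the memo dict only caches values of this same pure recursion,
-- so the port is the recursion itself; along every call from (n, m) the indices
-- j-1 < m and i-1 < n are in range, so List.getD is exact for loads[j-1]/power_plants[i-1].
def pvSolve (pp loads : List Int) : Nat → Nat → Int
  | _, 0 => 0
  | 0, _ + 1 => 0
  | i + 1, j + 1 =>
      let r := pvSolve pp loads (i + 1) j
      if loads.getD j 0 ≤ pp.getD i 0 then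
        max r (pvSolve pp loads i j + loads.getD j 0)
      else r

def distribute_power_plant_load_alt (power_plants : List Int) (loads : List Int) : Int :=
  pvSolve power_plants loads power_plants.length loads.length

-- ===== PRECONDITION & SPEC =====
def Spec_distribute_power_plant_load (power_plants : List Int) (loads : List Int) (out : Int) : Prop := out = distribute_power_plant_load_alt power_plants loads
instance (power_plants : List Int) (loads : List Int) (out : Int) : Decidable (Spec_distribute_power_plant_load power_plants loads out) := by unfold Spec_distribute_power_plant_load; infer_instance

-- ===== CLAIM (what is proved, stated in full; the proofs are below) =====
def Claim_equal_distribute_power_plant_load : Prop := ∀ (power_plants : List Int) (loads : List Int), Dom_distribute_power_plant_load power_plants loads → Spec_distribute_power_plant_load power_plants loads (distribute_power_plant_load power_plants loads)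

-- ===== LEMMAS AND PROOFS =====

-- Proof-only row machinery: pvRows pp loads k is row k of A's finished table.
def pvNewRow (p : Int) : List (Int × Int) → Int → List Int
  | [], _ => []
  | (l, r) :: rest, prev =>
      let best : Int := if l ≤ p then max prev (r + l) else prev
      best :: pvNewRow p rest best

def pvBstep (loads : List Int) (row : List Int) (p : Int) : List Int :=
  0 :: pvNewRow p (loads.zip row) 0

def pvRow0 (m : Nat) : List Int := List.replicate (m + 1) 0

def pvRows (pp loads : List Int) (k : Nat) : List Int :=
  (pp.take k).foldl (pvBstep loads) (pvRow0 loads.length)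

-- A's loop bodies under proof-friendly names (definitionally the port's lambdas)
def pvInner (pp loads : List Int) (i : Int) (dp : List (List Int)) (j : Int) : List (List Int) :=
  let v : Int :=
    if PySem.List.pyGetD loads (j - 1) 0 ≤ PySem.List.pyGetD pp (i - 1) 0 then
      max (PySem.List.pyGetD (PySem.List.pyGetD dp i []) (j - 1) 0)
          (PySem.List.pyGetD (PySem.List.pyGetD dp (i - 1) []) (j - 1) 0
            + PySem.List.pyGetD loads (j - 1) 0)
    else
      PySem.List.pyGetD (PySem.List.pyGetD dp i []) (j - 1) 0
  PySem.List.pySetD dp i (PySem.List.pySetD (PySem.List.pyGetD dp i []) j v)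

def pvOuter (pp loads : List Int) (dp : List (List Int)) (i : Int) : List (List Int) :=
  (PySem.List.pyRange 1 ((loads.length : Int) + 1) 1).foldl (pvInner pp loads i) dp

-- A's matrix after k outer passes / after t inner passes of pass k+1
def pvZeros (m cnt : Nat) : List (List Int) := List.replicate cnt (pvRow0 m)

def pvDp (pp loads : List Int) (k : Nat) : List (List Int) :=
  (List.range (k + 1)).map (pvRows pp loads) ++ pvZeros loads.length (pp.length - k)

def pvMid (pp loads : List Int) (k t : Nat) : List (List Int) :=
  (List.range (k + 1)).map (pvRows pp loads) ++
    ((pvRows pp loads (k + 1)).take (t + 1) ++ List.replicate (loads.length - t) 0) ::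
      pvZeros loads.length (pp.length - (k + 1))

lemma pvNewRow_length (p : Int) (pairs : List (Int × Int)) (prev : Int) :
    (pvNewRow p pairs prev).length = pairs.length := by
  induction pairs generalizing prev with
  | nil => rfl
  | cons hd tl ih => obtain ⟨l, r⟩ := hd; simp [pvNewRow, ih]

lemma pvFoldl_length (loads : List Int) (l : List Int) (row : List Int)
    (h : row.length = loads.length + 1) :
    (l.foldl (pvBstep loads) row).length = loads.length + 1 := by
  induction l generalizing row with
  | nil => simpa
  | cons p tl ih =>
      rw [List.foldl_cons]
      exact ih _ (by simp [pvBstep, pvNewRow_length, h])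

lemma pvRows_length (pp loads : List Int) (k : Nat) :
    (pvRows pp loads k).length = loads.length + 1 :=
  pvFoldl_length _ _ _ (by simp [pvRow0])

lemma pvRows_getD_zero (pp loads : List Int) (k : Nat) :
    (pvRows pp loads k).getD 0 0 = 0 := by
  unfold pvRows
  induction (pp.take k) using List.reverseRecOn with
  | nil => simp [pvRow0]
  | append_singleton l p _ => simp [List.foldl_append, pvBstep]

lemma pvRows_succ (pp loads : List Int) (k : Nat) (hk : k < pp.length) :
    pvRows pp loads (k + 1) = pvBstep loads (pvRows pp loads k) (pp.getD k 0) := by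
  unfold pvRows
  rw [List.take_succ_eq_append_getElem hk, List.getD_eq_getElem _ _ hk]
  simp only [List.foldl_append, List.foldl_cons, List.foldl_nil]

lemma pvNewRow_getD_succ (p : Int) (pairs : List (Int × Int)) (prev : Int) (t : Nat)
    (ht : t < pairs.length) :
    (prev :: pvNewRow p pairs prev).getD (t + 1) 0 =
      (if (pairs.getD t (0, 0)).1 ≤ p
        then max ((prev :: pvNewRow p pairs prev).getD t 0)
                 ((pairs.getD t (0, 0)).2 + (pairs.getD t (0, 0)).1)
        else (prev :: pvNewRow p pairs prev).getD t 0) := by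
  induction pairs generalizing prev t with
  | nil => simp at ht
  | cons hd tl ih =>
      obtain ⟨l, r⟩ := hd
      cases t with
      | zero => simp [pvNewRow]
      | succ s =>
          have := ih (if l ≤ p then max prev (r + l) else prev) s (by simpa using ht)
          simpa [pvNewRow] using this

lemma pvRows_getD_succ (pp loads : List Int) (k t : Nat)
    (hk : k < pp.length) (ht : t < loads.length) :
    (pvRows pp loads (k + 1)).getD (t + 1) 0 =
      if loads.getD t 0 ≤ pp.getD k 0
        then max ((pvRows pp loads (k + 1)).getD t 0)
                 ((pvRows pp loads k).getD t 0 + loads.getD t 0)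
        else (pvRows pp loads (k + 1)).getD t 0 := by
  have hlen : (pvRows pp loads k).length = loads.length + 1 := pvRows_length pp loads k
  have hzl : t < (loads.zip (pvRows pp loads k)).length := by simp [hlen]; omega
  have hz : (loads.zip (pvRows pp loads k)).getD t (0, 0) =
      (loads.getD t 0, (pvRows pp loads k).getD t 0) := by
    rw [List.getD_eq_getElem _ _ hzl, List.getElem_zip]
    rw [List.getD_eq_getElem _ _ ht, List.getD_eq_getElem _ _ (by omega)]
  have h := pvNewRow_getD_succ (pp.getD k 0) (loads.zip (pvRows pp loads k)) 0 t hzl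
  rw [pvRows_succ pp loads k hk]
  simp only [pvBstep] at *
  rw [h, hz]

lemma pvGetD_append_cons_len {α : Type} [Inhabited α] (P : List α) (c : α) (Z : List α) (d : α) :
    (P ++ c :: Z).getD P.length d = c := by
  simp [List.getD_eq_getElem?_getD]

lemma pvSet_append_cons_len {α : Type} (P : List α) (c : α) (Z : List α) (v : α) :
    (P ++ c :: Z).set P.length v = P ++ v :: Z := by
  simp

lemma pvGetD_append_left {α : Type} (P Q : List α) (i : Nat) (h : i < P.length) (d : α) :
    (P ++ Q).getD i d = P.getD i d := by
  simp [List.getD_eq_getElem?_getD, List.getElem?_append_left h]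

lemma pvInner_step (pp loads : List Int) (k t : Nat)
    (hk : k < pp.length) (ht : t < loads.length) :
    pvInner pp loads (1 + (k : Int)) (pvMid pp loads k t) (1 + (t : Int)) =
      pvMid pp loads k (t + 1) := by
  have hm1 : ((1 : Int) + (k : Int)) = ((k + 1 : Nat) : Int) := by push_cast; ring
  have hm2 : ((1 : Int) + (k : Int) - 1) = ((k : Nat) : Int) := by omega
  have ht1 : ((1 : Int) + (t : Int)) = ((t + 1 : Nat) : Int) := by push_cast; ring
  have ht2 : ((1 : Int) + (t : Int) - 1) = ((t : Nat) : Int) := by omega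
  have hrlen : (pvRows pp loads (k + 1)).length = loads.length + 1 := pvRows_length pp loads (k + 1)
  set P := (List.range (k + 1)).map (pvRows pp loads) with hP
  have hPlen : P.length = k + 1 := by rw [hP]; simp
  set Z := pvZeros loads.length (pp.length - (k + 1)) with hZ
  set M : List Int := (pvRows pp loads (k + 1)).take (t + 1) ++ List.replicate (loads.length - t) 0 with hM
  have htk : ((pvRows pp loads (k + 1)).take (t + 1)).length = t + 1 := by
    simp [hrlen]; omega
  -- dp[i] = M
  have g1 : (P ++ M :: Z).getD (k + 1) [] = M := by
    have h := pvGetD_append_cons_len P M Z []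
    rwa [hPlen] at h
  -- dp[i-1] = rows k
  have g2 : (P ++ M :: Z).getD k [] = pvRows pp loads k := by
    have hb : k < P.length := by omega
    rw [pvGetD_append_left _ _ k hb []]
    rw [hP]
    simp [List.getD_eq_getElem?_getD]
  -- M[t] = rows(k+1)[t]
  have g5 : M.getD t 0 = (pvRows pp loads (k + 1)).getD t 0 := by
    rw [hM, pvGetD_append_left _ _ t (by omega) 0]
    simp [List.getD_eq_getElem?_getD]
  -- writing M[t+1] extends the filled prefix
  have g6 : M.set (t + 1) ((pvRows pp loads (k + 1)).getD (t + 1) 0) =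
      (pvRows pp loads (k + 1)).take (t + 2) ++ List.replicate (loads.length - (t + 1)) 0 := by
    have hrep : List.replicate (loads.length - t) (0 : Int) =
        0 :: List.replicate (loads.length - (t + 1)) 0 := by
      rw [show loads.length - t = (loads.length - (t + 1)) + 1 by omega, List.replicate_succ]
    have h := pvSet_append_cons_len ((pvRows pp loads (k + 1)).take (t + 1)) (0 : Int)
      (List.replicate (loads.length - (t + 1)) 0) ((pvRows pp loads (k + 1)).getD (t + 1) 0)
    rw [htk] at h
    rw [hM, hrep, h]
    rw [show (pvRows pp loads (k + 1)).take (t + 2) =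
          (pvRows pp loads (k + 1)).take (t + 1) ++ [(pvRows pp loads (k + 1)).getD (t + 1) 0] by
        rw [List.take_succ_eq_append_getElem (by omega), List.getD_eq_getElem _ _ (by omega)]]
    rw [List.append_assoc]
    rfl
  -- the outer write
  have g8 : ∀ r : List Int, (P ++ M :: Z).set (k + 1) r = P ++ r :: Z := by
    intro r
    have h := pvSet_append_cons_len P M Z r
    rwa [hPlen] at h
  -- assemble
  simp only [pvInner, pvMid, ← hP, ← hZ, ← hM]
  rw [hm2, ht2]
  simp only [PySem.List.pyGetD_natCast]
  rw [ht1, hm1]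
  simp only [PySem.List.pyGetD_natCast, PySem.List.pySetD_natCast]
  rw [g1, g2, g5, g8]
  rw [← pvRows_getD_succ pp loads k t hk ht]
  rw [g6]

lemma pvMid_zero (pp loads : List Int) (k : Nat) (hk : k < pp.length) :
    pvMid pp loads k 0 = pvDp pp loads k := by
  unfold pvMid pvDp pvZeros
  have h1 : (pvRows pp loads (k + 1)).take 1 = [0] := by
    rw [List.take_succ_eq_append_getElem (by rw [pvRows_length]; omega)]
    rw [List.take_zero, List.nil_append]
    rw [← List.getD_eq_getElem _ 0 _, pvRows_getD_zero]
  have h2 : pp.length - k = (pp.length - (k + 1)) + 1 := by omega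
  rw [h1, h2, List.replicate_succ]
  simp [pvRow0, List.replicate_succ]

lemma pvMid_last (pp loads : List Int) (k : Nat) :
    pvMid pp loads k loads.length = pvDp pp loads (k + 1) := by
  unfold pvMid pvDp pvZeros
  rw [List.take_of_length_le (by rw [pvRows_length])]
  rw [List.range_succ (n := k + 1), List.map_append]
  simp

lemma pvOuter_step (pp loads : List Int) (k : Nat) (hk : k < pp.length) :
    pvOuter pp loads (pvDp pp loads k) (1 + (k : Int)) = pvDp pp loads (k + 1) := by
  unfold pvOuter
  rw [PySem.List.pyRange_one]
  rw [show (((loads.length : Int) + 1 - 1)).toNat = loads.length by omega]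
  rw [List.foldl_map]
  suffices h : ∀ t, t ≤ loads.length →
      (List.range t).foldl (fun dp (s : Nat) => pvInner pp loads (1 + (k : Int)) dp (1 + (s : Int)))
        (pvDp pp loads k) = pvMid pp loads k t by
    rw [h loads.length le_rfl, pvMid_last]
  intro t htle
  induction t with
  | zero => rw [List.range_zero, List.foldl_nil, pvMid_zero pp loads k hk]
  | succ s ih =>
      rw [List.range_succ, List.foldl_append, ih (by omega), List.foldl_cons, List.foldl_nil]
      exact pvInner_step pp loads k s hk (by omega)

lemma pvOuterFold (pp loads : List Int) : ∀ k, k ≤ pp.length →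
    (List.range k).foldl (fun dp (s : Nat) => pvOuter pp loads dp (1 + (s : Int)))
      (pvDp pp loads 0) = pvDp pp loads k := by
  intro k
  induction k with
  | zero => intro _; rw [List.range_zero, List.foldl_nil]
  | succ s ih =>
      intro hs
      rw [List.range_succ, List.foldl_append, ih (by omega), List.foldl_cons, List.foldl_nil]
      exact pvOuter_step pp loads s (by omega)

lemma pvDp_zero (pp loads : List Int) :
    (PySem.List.pyRange 0 ((pp.length : Int) + 1) 1).map
        (fun _ => (PySem.List.pyRange 0 ((loads.length : Int) + 1) 1).map (fun _ => (0 : Int))) =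
      pvDp pp loads 0 := by
  have hin : (PySem.List.pyRange 0 ((loads.length : Int) + 1) 1).map (fun _ => (0 : Int)) =
      pvRow0 loads.length := by
    rw [List.map_const']
    rw [PySem.List.length_pyRange_one]
    rw [show (((loads.length : Int) + 1 - 0)).toNat = loads.length + 1 by omega]
    rfl
  rw [hin, List.map_const', PySem.List.length_pyRange_one]
  rw [show (((pp.length : Int) + 1 - 0)).toNat = pp.length + 1 by omega]
  unfold pvDp pvZeros
  have h0 : pvRows pp loads 0 = pvRow0 loads.length := rfl
  simp [h0, List.replicate_succ]

lemma pvDp_final_getD (pp loads : List Int) :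
    ((pvDp pp loads pp.length).getD pp.length []).getD loads.length 0 =
      (pvRows pp loads pp.length).getD loads.length 0 := by
  unfold pvDp pvZeros
  rw [Nat.sub_self, List.replicate_zero, List.append_nil]
  congr 1
  simp [List.getD_eq_getElem?_getD]

-- the bridge: row k of A's table at column t is exactly B's solve(k, t)
lemma pvRows_eq_pvSolve (pp loads : List Int) : ∀ (k : Nat), k ≤ pp.length →
    ∀ (t : Nat), t ≤ loads.length →
    (pvRows pp loads k).getD t 0 = pvSolve pp loads k t := by
  intro k
  induction k with
  | zero =>
      intro _ t _
      have h0 : (pvRows pp loads 0).getD t 0 = 0 := by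
        unfold pvRows pvRow0
        simp [List.getD_eq_getElem?_getD, List.getElem?_replicate]
        split <;> rfl
      rw [h0]
      cases t with
      | zero => simp [pvSolve]
      | succ s => simp [pvSolve]
  | succ k ih =>
      intro hk t
      induction t with
      | zero => intro _; rw [pvRows_getD_zero]; simp [pvSolve]
      | succ s ihs =>
          intro hs
          rw [pvRows_getD_succ pp loads k s (by omega) (by omega)]
          rw [ihs (by omega), ih (by omega) s (by omega)]
          simp [pvSolve]

-- ===== VERDICT =====
theorem distribute_power_plant_load_spec : Claim_equal_distribute_power_plant_load := by
  unfold Claim_equal_distribute_power_plant_load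
  intro pp loads _
  unfold Spec_distribute_power_plant_load
  have hA : distribute_power_plant_load pp loads =
      PySem.List.pyGetD (PySem.List.pyGetD
        ((PySem.List.pyRange 1 ((pp.length : Int) + 1) 1).foldl (pvOuter pp loads)
          ((PySem.List.pyRange 0 ((pp.length : Int) + 1) 1).map
            (fun _ => (PySem.List.pyRange 0 ((loads.length : Int) + 1) 1).map (fun _ => (0 : Int)))))
        ((pp.length : Int)) []) ((loads.length : Int)) 0 := rfl
  rw [hA, pvDp_zero, PySem.List.pyRange_one]
  rw [show (((pp.length : Int) + 1 - 1)).toNat = pp.length by omega]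
  rw [List.foldl_map]
  rw [pvOuterFold pp loads pp.length le_rfl]
  simp only [PySem.List.pyGetD_natCast]
  rw [pvDp_final_getD]
  rw [pvRows_eq_pvSolve pp loads pp.length le_rfl loads.length le_rfl]
  rfl
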